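-- pv_equiv track=rewrite | github.com/avielmoshe/Introduction-to-Computer-Science | python/homework8.py | find_col_with_most_appearances
-- ===== SOURCE A (Python) =====
-- def find_col_with_most_appearances(letters, ch):
--     if not letters or not letters[0]:
--         return -1
--
--     num_cols = len(letters[0])
--     counts = [0] * num_cols
--
--     for row in letters:
--         for col in range(num_cols):
--             if row[col] == ch:
--                 counts[col] += 1
--
--     max_count = max(counts)
--     if max_count == 0:
--         return -1
--
--     return counts.index(max_count)
-- ===== SOURCE B (Python) =====
-- def find_col_with_most_appearances(letters, ch):
--     if not letters or not letters[0]: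
--         return -1
--
--     num_cols = len(letters[0])
--
--     def counts_for(c):
--         return sum(row[c] == ch for row in letters)
--
--     best = max(range(num_cols), key=counts_for)
--     if counts_for(best) == 0:
--         return -1
--     return best
-- ===== Notes on version B (the rewrite author's own statement) =====
-- stated objective: alternative
-- what changed: B computes each column's count independently (column-major, max over column indices with a key function) instead of accumulating a mutable counts array in a row-major pass and then scanning it with max and counts.index.
import Mathlib
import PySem

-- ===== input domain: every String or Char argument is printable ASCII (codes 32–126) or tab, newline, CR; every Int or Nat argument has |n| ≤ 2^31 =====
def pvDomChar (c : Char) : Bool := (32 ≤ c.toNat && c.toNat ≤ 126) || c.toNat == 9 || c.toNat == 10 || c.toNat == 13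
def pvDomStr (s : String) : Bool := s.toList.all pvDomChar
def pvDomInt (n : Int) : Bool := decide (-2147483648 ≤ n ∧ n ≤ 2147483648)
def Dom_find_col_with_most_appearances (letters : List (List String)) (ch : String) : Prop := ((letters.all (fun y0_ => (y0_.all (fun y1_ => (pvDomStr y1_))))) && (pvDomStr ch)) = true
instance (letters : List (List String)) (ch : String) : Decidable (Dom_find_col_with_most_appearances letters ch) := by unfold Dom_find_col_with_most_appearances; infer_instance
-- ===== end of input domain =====

-- B replaces A's row-major accumulation into a mutable counts array (then max + counts.index)
-- by an independent column-major count per column and max over column indices with a key function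
-- ('alternative': same cost, different decomposition). Return values only; neither mutates its input.

-- ===== PORT A =====
def find_col_with_most_appearances (letters : List (List String)) (ch : String) : Int :=
  if letters = [] ∨ letters.headD [] = [] then -1
  else
    let numCols := (letters.headD []).length
    let counts : List Int := letters.foldl (fun counts row =>
      (PySem.List.pyRange 0 (numCols : Int) 1).foldl (fun cnts col =>
        if PySem.List.pyGetD row col "" = ch then
          cnts.set col.toNat (PySem.List.pyGetD cnts col 0 + 1)
        else cnts) counts) (List.replicate numCols (0 : Int))
    match PySem.List.max? counts (fun x => x) with
    | none => -1
    | some maxCount =>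
      if maxCount = 0 then -1
      else ((PySem.List.index? counts maxCount).getD 0 : Int)

-- ===== PORT B =====
def pvCountsFor (letters : List (List String)) (ch : String) (c : Int) : Int :=
  letters.foldl (fun acc row => acc + (if PySem.List.pyGetD row c "" = ch then 1 else 0)) 0

def find_col_with_most_appearances_alt (letters : List (List String)) (ch : String) : Int :=
  if letters = [] ∨ letters.headD [] = [] then -1
  else
    let numCols := (letters.headD []).length
    match PySem.List.max? (PySem.List.pyRange 0 (numCols : Int) 1) (pvCountsFor letters ch) with
    | none => -1
    | some best =>
      if pvCountsFor letters ch best = 0 then -1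
      else best

-- ===== PRECONDITION & SPEC =====
-- Pre_ excludes ragged inputs (some row shorter than the first row), on which the Python A
-- raises IndexError at row[col] (and B raises there too).
def Pre_find_col_with_most_appearances (letters : List (List String)) (ch : String) : Prop :=
  ∀ row ∈ letters, (letters.headD []).length ≤ row.length
instance (letters : List (List String)) (ch : String) : Decidable (Pre_find_col_with_most_appearances letters ch) := by unfold Pre_find_col_with_most_appearances; infer_instance

def pvWitness_find_col_with_most_appearances : List (List String) × String := ([["a", "b"], ["b", "b"]], "b")

def Spec_find_col_with_most_appearances (letters : List (List String)) (ch : String) (out : Int) : Prop := out = find_col_with_most_appearances_alt letters ch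
instance (letters : List (List String)) (ch : String) (out : Int) : Decidable (Spec_find_col_with_most_appearances letters ch out) := by unfold Spec_find_col_with_most_appearances; infer_instance

-- ===== CLAIM (what is proved, stated in full; the proofs are below) =====
def Claim_equal_find_col_with_most_appearances : Prop := ∀ (letters : List (List String)) (ch : String), Dom_find_col_with_most_appearances letters ch → Pre_find_col_with_most_appearances letters ch → Spec_find_col_with_most_appearances letters ch (find_col_with_most_appearances letters ch)

-- ===== LEMMAS AND PROOFS =====

-- 0/1 indicator used by both counting shapes.
def pvInd (ch : String) (row : List String) (c : Int) : Int :=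
  if PySem.List.pyGetD row c "" = ch then 1 else 0

-- counts_for with a generalized accumulator (pvCountsFor letters ch c = pvCnt ch letters c 0).
def pvCnt (ch : String) (rows : List (List String)) (c : Int) (a : Int) : Int :=
  rows.foldl (fun acc row => acc + pvInd ch row c) a

theorem pvCountsFor_eq_pvCnt (letters : List (List String)) (ch : String) (c : Int) :
    pvCountsFor letters ch c = pvCnt ch letters c 0 := rfl

-- A's inner loop on a map-over-range state updates exactly the first k positions.
theorem pv_inner (ch : String) (r : List String) (N : Nat) :
    ∀ (k : Nat), k ≤ N → ∀ (g : Int → Int),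
      (PySem.List.pyRange 0 (k : Int) 1).foldl (fun cnts col =>
          if PySem.List.pyGetD r col "" = ch then
            cnts.set col.toNat (PySem.List.pyGetD cnts col 0 + 1)
          else cnts) ((PySem.List.pyRange 0 (N : Int) 1).map g)
      = (PySem.List.pyRange 0 (N : Int) 1).map
          (fun c => if c < (k : Int) then g c + pvInd ch r c else g c) := by
  intro k
  induction k with
  | zero =>
    intro _ g
    rw [show ((0 : Nat) : Int) = 0 by simp]
    rw [PySem.List.pyRange_one_eq_nil (le_refl 0)]
    simp only [List.foldl_nil]
    refine (List.map_congr_left ?_).symm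
    intro c hc
    rw [PySem.List.mem_pyRange_one] at hc
    rw [if_neg (by omega)]
  | succ k ih =>
    intro hk g
    have hk' : k ≤ N := by omega
    have hcast : ((k + 1 : Nat) : Int) = (k : Int) + 1 := by push_cast; ring
    have hsplit : PySem.List.pyRange 0 ((k : Int) + 1) 1
        = PySem.List.pyRange 0 (k : Int) 1 ++ [(k : Int)] :=
      PySem.List.pyRange_one_succ_right (by omega)
    rw [hcast, hsplit, List.foldl_append, ih hk' g]
    simp only [List.foldl_cons, List.foldl_nil]
    set h : Int → Int := fun c => if c < (k : Int) then g c + pvInd ch r c else g c with hh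
    by_cases hcond : PySem.List.pyGetD r (k : Int) "" = ch
    · rw [if_pos hcond]
      have hget : PySem.List.pyGetD ((PySem.List.pyRange 0 (N : Int) 1).map h) (k : Int) 0
          = h (k : Int) :=
        PySem.List.pyGetD_map_pyRange h N k 0 (by omega)
      have hval : h (k : Int) + 1 = g (k : Int) + pvInd ch r (k : Int) := by
        simp only [hh, if_neg (by omega : ¬ (k : Int) < (k : Int)), pvInd, if_pos hcond]
      rw [hget, hval]
      apply List.ext_getElem
      · simp
      · intro j hj1 hj2
        have hjN : j < N := by
          simpa [PySem.List.length_pyRange_one] using hj2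
        simp only [List.getElem_set, List.getElem_map, PySem.List.getElem_pyRange_one, zero_add]
        rcases eq_or_ne ((k : Int).toNat) j with hjk | hjk
        · rw [if_pos hjk]
          have hjk2 : (j : Int) = (k : Int) := by omega
          rw [hjk2, if_pos (by omega : (k : Int) < (k : Int) + 1)]
        · rw [if_neg hjk]
          simp only [hh]
          by_cases hlt : (j : Int) < (k : Int)
          · rw [if_pos hlt, if_pos (by omega : (j : Int) < (k : Int) + 1)]
          · rw [if_neg hlt, if_neg (by omega : ¬ (j : Int) < (k : Int) + 1)]
    · rw [if_neg hcond]
      apply List.map_congr_left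
      intro c hc
      rw [PySem.List.mem_pyRange_one] at hc
      simp only [hh]
      by_cases hlt : c < (k : Int)
      · rw [if_pos hlt, if_pos (by omega : c < (k : Int) + 1)]
      · rw [if_neg hlt]
        by_cases hlt1 : c < (k : Int) + 1
        · rw [if_pos hlt1]
          have hck : c = (k : Int) := by omega
          simp only [pvInd, hck, if_neg hcond, add_zero]
        · rw [if_neg hlt1]

-- A's outer loop computes, columnwise, B's per-column counts.
theorem pv_outer (ch : String) (N : Nat) :
    ∀ (rows : List (List String)) (g : Int → Int),
      rows.foldl (fun counts row =>
          (PySem.List.pyRange 0 (N : Int) 1).foldl (fun cnts col =>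
            if PySem.List.pyGetD row col "" = ch then
              cnts.set col.toNat (PySem.List.pyGetD cnts col 0 + 1)
            else cnts) counts) ((PySem.List.pyRange 0 (N : Int) 1).map g)
      = (PySem.List.pyRange 0 (N : Int) 1).map (fun c => pvCnt ch rows c (g c)) := by
  intro rows
  induction rows with
  | nil => intro g; rfl
  | cons r rest ih =>
    intro g
    simp only [List.foldl_cons]
    rw [pv_inner ch r N N (le_refl N) g]
    have hstate : (PySem.List.pyRange 0 (N : Int) 1).map
        (fun c => if c < (N : Int) then g c + pvInd ch r c else g c)
        = (PySem.List.pyRange 0 (N : Int) 1).map (fun c => g c + pvInd ch r c) := by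
      apply List.map_congr_left
      intro c hc
      rw [PySem.List.mem_pyRange_one] at hc
      rw [if_pos hc.2]
    rw [hstate, ih (fun c => g c + pvInd ch r c)]
    rfl

-- The running-max over xs starting from m (Python max keeps the FIRST extremum).
def pvRun (f : Int → Int) (m : Int) (xs : List Int) : Int :=
  xs.foldl (fun m x => if f m < f x then x else m) m

theorem pv_max?_cons (f : Int → Int) (m : Int) (xs : List Int) :
    PySem.List.max? (m :: xs) f = some (pvRun f m xs) := by
  show List.foldl _ (some m) xs = _
  induction xs generalizing m with
  | nil => rfl
  | cons x t ih =>
    have h1 : pvRun f m (x :: t) = pvRun f (if f m < f x then x else m) t := rfl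
    rw [h1, List.foldl_cons]
    have h2 : (if f m < f x then some x else some m) = some (if f m < f x then x else m) := by
      by_cases h : f m < f x <;> simp [h]
    show List.foldl _ (if f m < f x then some x else some m) t = _
    rw [h2]
    exact ih (if f m < f x then x else m)

-- first index of the max value in the key list = the first argmax Python's max picks.
theorem pv_run_spec (f : Int → Int) :
    ∀ (xs : List Int) (m : Int), ∃ k : Nat,
      PySem.List.index? ((m :: xs).map f) (f (pvRun f m xs)) = some k ∧
      (m :: xs)[k]? = some (pvRun f m xs) ∧
      (∀ y ∈ m :: xs, f y ≤ f (pvRun f m xs)) := by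
  intro xs
  induction xs with
  | nil =>
    intro m
    refine ⟨0, ?_, rfl, ?_⟩
    · simp [PySem.List.index?, pvRun, List.idxOf?]
    · intro y hy; simp at hy; subst hy; simp [pvRun]
  | cons x t ih =>
    intro m
    by_cases h : f m < f x
    · obtain ⟨k, hidx, hget, hmax⟩ := ih x
      have hb : pvRun f m (x :: t) = pvRun f x t := by simp [pvRun, if_pos h]
      have hne : f m ≠ f (pvRun f x t) := by
        have := hmax x (by simp)
        omega
      refine ⟨k + 1, ?_, ?_, ?_⟩
      · rw [hb]
        simp only [List.map_cons] at hidx ⊢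
        rw [PySem.List.index?_cons_of_ne _ hne, hidx]; rfl
      · rw [hb]; simpa using hget
      · rw [hb]
        intro y hy
        rcases List.mem_cons.mp hy with hy | hy
        · subst hy
          have := hmax x (by simp)
          omega
        · exact hmax y hy
    · obtain ⟨k, hidx, hget, hmax⟩ := ih m
      have hb : pvRun f m (x :: t) = pvRun f m t := by simp [pvRun, if_neg h]
      have hxle : f x ≤ f m := by omega
      have hmle : f m ≤ f (pvRun f m t) := hmax m (by simp)
      rcases Nat.eq_zero_or_pos k with hk0 | hkpos
      · subst hk0
        have hgm : pvRun f m t = m := by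
          have h' := hget; simp at h'; omega
        refine ⟨0, ?_, ?_, ?_⟩
        · rw [hb, hgm]
          simp only [List.map_cons]
          exact PySem.List.index?_cons_self (f m) _
        · rw [hb, hgm]; rfl
        · rw [hb]
          intro y hy
          rcases List.mem_cons.mp hy with hy | hy
          · subst hy; omega
          · rcases List.mem_cons.mp hy with hy | hy
            · subst hy; omega
            · exact hmax y (List.mem_cons_of_mem m hy)
      · -- k ≥ 1: the head m does not attain the max, and neither does x
        have hmne : f m ≠ f (pvRun f m t) := by
          intro heq
          have h0 : PySem.List.index? ((m :: t).map f) (f (pvRun f m t)) = some 0 := by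
            simp only [List.map_cons]
            rw [← heq]
            exact PySem.List.index?_cons_self (f m) _
          rw [hidx] at h0
          simp at h0
          omega
        have hmlt : f m < f (pvRun f m t) := lt_of_le_of_ne hmle hmne
        have hxne : f x ≠ f (pvRun f m t) := by omega
        refine ⟨k + 1, ?_, ?_, ?_⟩
        · rw [hb]
          simp only [List.map_cons] at hidx ⊢
          rw [PySem.List.index?_cons_of_ne _ hmne, PySem.List.index?_cons_of_ne _ hxne]
          rw [PySem.List.index?_cons_of_ne _ hmne] at hidx
          cases htail : PySem.List.index? (t.map f) (f (pvRun f m t)) with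
          | none => rw [htail] at hidx; simp at hidx
          | some j =>
            rw [htail] at hidx
            simp at hidx
            simp [hidx]
        · rw [hb]
          rcases k with _ | k'
          · omega
          · simpa using hget
        · rw [hb]
          intro y hy
          rcases List.mem_cons.mp hy with hy | hy
          · subst hy; omega
          · rcases List.mem_cons.mp hy with hy | hy
            · subst hy; omega
            · exact hmax y (List.mem_cons_of_mem m hy)

-- ===== VERDICT (by name: the statement is the Claim_ definition above) =====
theorem find_col_with_most_appearances_spec : Claim_equal_find_col_with_most_appearances := by
  intro letters ch _hdom _hpre
  unfold Spec_find_col_with_most_appearances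
  unfold find_col_with_most_appearances find_col_with_most_appearances_alt
  by_cases hbase : letters = [] ∨ letters.headD [] = []
  · rw [if_pos hbase, if_pos hbase]
  · rw [if_neg hbase, if_neg hbase]
    dsimp only
    set N := (letters.headD []).length with hN
    set f := pvCountsFor letters ch with hf
    set cols := PySem.List.pyRange 0 (N : Int) 1 with hcols
    -- counts = cols.map f
    have hrepl : List.replicate N (0 : Int) = cols.map (fun _ => (0 : Int)) := by
      rw [hcols]
      rw [List.map_const']
      rw [PySem.List.length_pyRange_one]
      have h0 : (((N : Int)) - 0).toNat = N := by omega
      rw [h0]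
    have hcounts : letters.foldl (fun counts row =>
        cols.foldl (fun cnts col =>
          if PySem.List.pyGetD row col "" = ch then
            cnts.set col.toNat (PySem.List.pyGetD cnts col 0 + 1)
          else cnts) counts) (List.replicate N (0 : Int)) = cols.map f := by
      rw [hrepl, hcols]
      rw [pv_outer ch N letters (fun _ => (0 : Int))]
      apply List.map_congr_left
      intro c _
      rw [hf, pvCountsFor_eq_pvCnt]
    simp only [hcounts]
    -- N > 0, so cols = 0 :: rest
    have hNpos : 0 < N := by
      rcases (not_or.mp hbase) with ⟨_, h2⟩
      rw [hN]
      exact List.length_pos_iff.mpr h2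
    have hcons : cols = (0 : Int) :: PySem.List.pyRange 1 (N : Int) 1 := by
      rw [hcols]
      exact PySem.List.pyRange_one_cons (by omega)
    set rest := PySem.List.pyRange 1 (N : Int) 1 with hrest
    set b := pvRun f 0 rest with hb
    have hmaxB : PySem.List.max? cols f = some b := by
      rw [hcons]; exact pv_max?_cons f 0 rest
    obtain ⟨k, hidx, hget, hmax⟩ := pv_run_spec f rest 0
    rw [← hcons] at hidx hget hmax
    -- A's max of the value list equals f b
    have hmaxA : PySem.List.max? (cols.map f) (fun x => x) = some (f b) := by
      have hne : cols.map f ≠ [] := by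
        rw [hcons]; simp
      cases hA : PySem.List.max? (cols.map f) (fun x => x) with
      | none =>
        rw [PySem.List.max?_eq_none_iff] at hA
        exact absurd hA hne
      | some m' =>
        have hm'mem : m' ∈ cols.map f := PySem.List.max?_mem hA
        obtain ⟨c, hc, hcm'⟩ := List.mem_map.mp hm'mem
        have h1 : m' ≤ f b := by
          rw [← hcm']; exact hmax c hc
        have h2 : f b ≤ m' := by
          have hbmem : b ∈ cols := PySem.List.max?_mem hmaxB
          have := PySem.List.max?_isMax hA (f b) (List.mem_map_of_mem hbmem)
          simpa using this
        have : m' = f b := le_antisymm h1 h2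
        rw [this]
    rw [hmaxB, hmaxA]
    dsimp only
    by_cases hz : f b = 0
    · rw [if_pos hz, if_pos hz]
    · rw [if_neg hz, if_neg hz]
      rw [hidx]
      have hbk : b = (k : Int) := by
        have hklen : k < cols.length := by
          by_contra hge
          rw [List.getElem?_eq_none (by omega)] at hget
          simp at hget
        have : cols[k]? = some ((0 : Int) + (k : Int)) := by
          rw [hcols]
          rw [PySem.List.getElem?_pyRange_one]
          rw [if_pos]
          rw [hcols, PySem.List.length_pyRange_one] at hklen
          omega
        rw [hget] at this
        simpa using Option.some.inj this
      rw [hbk]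
      rfl
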